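-- pv_equiv track=rewrite | github.com/Varshini-Gangatharan/PYTHON-PROGRAMMING-DAY-1 | PRGM 7.py | num_string
-- ===== SOURCE A (Python) =====
-- def num_string(n):
--     arr = [[0] * 5 for _ in range(n + 1)]
--     for j in range(5):
--         arr[1][j] = 1
--     for i in range(2, n + 1):
--         for j in range(5):
--             arr[i][j] = sum(arr[i - 1][:j + 1])
--     total_count = sum(arr[n])
--     return total_count
-- ===== SOURCE B (Python) =====
-- def num_string(n):
--     # closed form: C(n+4, 4)
--     return (n + 1) * (n + 2) * (n + 3) * (n + 4) // 24
-- ===== Notes on version B (the rewrite author's own statement) =====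
-- stated objective: faster
-- what changed: Replaces the O(n) dynamic-programming table (n+1 rows of 5 prefix sums) by the closed-form binomial coefficient C(n+4,4) = (n+1)(n+2)(n+3)(n+4)//24.
import Mathlib
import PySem

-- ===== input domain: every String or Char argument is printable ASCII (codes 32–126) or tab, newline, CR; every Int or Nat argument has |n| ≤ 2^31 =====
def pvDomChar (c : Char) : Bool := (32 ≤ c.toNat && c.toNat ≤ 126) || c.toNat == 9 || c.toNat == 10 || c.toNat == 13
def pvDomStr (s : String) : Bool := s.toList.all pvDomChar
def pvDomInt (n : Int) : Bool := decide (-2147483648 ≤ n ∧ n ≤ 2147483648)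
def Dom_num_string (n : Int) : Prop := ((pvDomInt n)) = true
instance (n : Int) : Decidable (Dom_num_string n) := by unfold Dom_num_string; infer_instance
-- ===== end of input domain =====

-- B replaces A's O(n) dynamic-programming table by the closed form C(n+4,4) = (n+1)(n+2)(n+3)(n+4)//24.

-- ===== PORT A =====
-- Helpers name the loop bodies of A.  Under Pre_ (1 ≤ n) every index Python
-- touches (1, i, i-1, j, n) is nonnegative and in range, so arr[i] is ported
-- exactly with .toNat indexing, List.set and List.getD; sum(xs) is foldl (+) 0,
-- and arr[i-1][:j+1] is PySem.List.slice.

-- arr[1][j] = 1  (body of the first loop)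
def pvA_set1 (arr : List (List Int)) (j : Int) : List (List Int) :=
  arr.set 1 ((arr.getD 1 []).set j.toNat 1)

-- arr[i][j] = sum(arr[i-1][:j+1])  (body of the inner loop)
def pvA_inner (i : Int) (arr : List (List Int)) (j : Int) : List (List Int) :=
  arr.set i.toNat ((arr.getD i.toNat []).set j.toNat
    ((PySem.List.slice (arr.getD (i - 1).toNat []) none (some (j + 1))).foldl (· + ·) 0))

-- the inner 'for j in range(5)' loop as one outer-loop step
def pvA_outer (arr : List (List Int)) (i : Int) : List (List Int) :=
  (PySem.List.pyRange 0 5 1).foldl (pvA_inner i) arr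

def num_string (n : Int) : Int :=
  let arr0 : List (List Int) := (PySem.List.pyRange 0 (n + 1) 1).map (fun _ => [0, 0, 0, 0, 0])
  let arr1 : List (List Int) := (PySem.List.pyRange 0 5 1).foldl pvA_set1 arr0
  let arr2 : List (List Int) := (PySem.List.pyRange 2 (n + 1) 1).foldl pvA_outer arr1
  (arr2.getD n.toNat []).foldl (· + ·) 0

-- ===== PORT B =====
def num_string_alt (n : Int) : Int :=
  PySem.Int.floordiv ((n + 1) * (n + 2) * (n + 3) * (n + 4)) 24

-- ===== PRECONDITION & SPEC =====
-- A raises IndexError (arr[1] on a table with at most one row) for every n ≤ 0.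
def Pre_num_string (n : Int) : Prop := 1 ≤ n
instance (n : Int) : Decidable (Pre_num_string n) := by unfold Pre_num_string; infer_instance
def pvWitness_num_string : Int := 3

def Spec_num_string (n : Int) (out : Int) : Prop := out = num_string_alt n
instance (n : Int) (out : Int) : Decidable (Spec_num_string n out) := by unfold Spec_num_string; infer_instance

-- ===== CLAIM (what is proved, stated in full; the proofs are below) =====
def Claim_equal_num_string : Prop := ∀ (n : Int), Dom_num_string n → Pre_num_string n → Spec_num_string n (num_string n)

-- ===== LEMMAS AND PROOFS =====

-- the DP row i+1 of A's table, as a quintuple (each row is the prefix sums of the previous one)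
def pvR : Nat → Int × Int × Int × Int × Int
  | 0 => (1, 1, 1, 1, 1)
  | k + 1 =>
    let t := pvR k
    (t.1, t.1 + t.2.1, t.1 + t.2.1 + t.2.2.1, t.1 + t.2.1 + t.2.2.1 + t.2.2.2.1,
      t.1 + t.2.1 + t.2.2.1 + t.2.2.2.1 + t.2.2.2.2)

def pvQ (t : Int × Int × Int × Int × Int) : List Int :=
  [t.1, t.2.1, t.2.2.1, t.2.2.2.1, t.2.2.2.2]

theorem pvLen5 (l : List Int) (h : l.length = 5) : ∃ a b c d e : Int, l = [a, b, c, d, e] := by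
  match l, h with
  | [a, b, c, d, e], _ => exact ⟨a, b, c, d, e, rfl⟩

theorem pvGetD_set_self (l : List (List Int)) (i : Nat) (x : List Int) (h : i < l.length) :
    (l.set i x).getD i [] = x := by
  rw [List.getD_eq_getElem?_getD, List.getElem?_set_self h]; rfl

theorem pvGetD_set_ne (l : List (List Int)) (i j : Nat) (x : List Int) (h : i ≠ j) :
    (l.set i x).getD j [] = l.getD j [] := by
  rw [List.getD_eq_getElem?_getD, List.getElem?_set_ne h, ← List.getD_eq_getElem?_getD]

theorem pvMem_set {α : Type} (xs : List α) (i : Nat) (x l : α) (h : l ∈ xs.set i x) :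
    l ∈ xs ∨ l = x := by
  induction xs generalizing i with
  | nil => simp [List.set] at h
  | cons y ys ih =>
    cases i with
    | zero => simp [List.set] at h; tauto
    | succ i =>
      simp [List.set] at h
      rcases h with h | h
      · exact Or.inl (by simp [h])
      · rcases ih i h with h' | h'
        · exact Or.inl (by simp [h'])
        · exact Or.inr h'

theorem pvGetD_mem {α : Type} [Inhabited α] (xs : List α) (i : Nat) (d : α) (h : i < xs.length) :
    xs.getD i d ∈ xs := by
  rw [List.getD_eq_getElem xs d h]; exact List.getElem_mem h

theorem pvRange5 : PySem.List.pyRange 0 5 1 = [0, 1, 2, 3, 4] := by decide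

-- first loop: arr[1][j] = 1 for j in range(5)
theorem pvSet1_step (arr : List (List Int)) (X : List Int) (j : Int) (h1 : 1 < arr.length) :
    pvA_set1 (arr.set 1 X) j = arr.set 1 (X.set j.toNat 1) := by
  unfold pvA_set1
  rw [pvGetD_set_self _ _ _ h1, List.set_set]

theorem pvSet1_loop (arr : List (List Int)) (h1 : 1 < arr.length)
    (hlen : (arr.getD 1 []).length = 5) :
    (PySem.List.pyRange 0 5 1).foldl pvA_set1 arr = arr.set 1 [1, 1, 1, 1, 1] := by
  obtain ⟨a, b, c, d, e, hrow⟩ := pvLen5 _ hlen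
  rw [pvRange5]
  simp only [List.foldl]
  rw [show pvA_set1 arr 0 = arr.set 1 ([a, b, c, d, e].set (0 : Int).toNat 1) from by
        unfold pvA_set1; rw [hrow],
      pvSet1_step _ _ _ h1, pvSet1_step _ _ _ h1, pvSet1_step _ _ _ h1, pvSet1_step _ _ _ h1]
  rfl

-- inner loop: one step, with the previous row pinned
theorem pvInner_step (arr : List (List Int)) (i : Int) (X : List Int) (j : Int)
    (hi : 2 ≤ i) (hil : i.toNat < arr.length) (prev : List Int)
    (hprev : arr.getD (i - 1).toNat [] = prev) :
    pvA_inner i (arr.set i.toNat X) j =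
      arr.set i.toNat (X.set j.toNat
        ((PySem.List.slice prev none (some (j + 1))).foldl (· + ·) 0)) := by
  unfold pvA_inner
  rw [pvGetD_set_self _ _ _ hil, pvGetD_set_ne _ _ _ _ (by omega), hprev, List.set_set]

-- inner loop: the five assignments overwrite row i with the prefix sums of row i-1
theorem pvInner_loop (arr : List (List Int)) (i : Int) (hi : 2 ≤ i)
    (hil : i.toNat < arr.length) (hlen : (arr.getD i.toNat []).length = 5)
    (a b c d e : Int) (hprev : arr.getD (i - 1).toNat [] = [a, b, c, d, e]) :
    pvA_outer arr i =
      arr.set i.toNat [a, a + b, a + b + c, a + b + c + d, a + b + c + d + e] := by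
  obtain ⟨p0, p1, p2, p3, p4, hrow⟩ := pvLen5 _ hlen
  unfold pvA_outer
  rw [pvRange5]
  simp only [List.foldl]
  rw [show pvA_inner i arr 0 = arr.set i.toNat ([p0, p1, p2, p3, p4].set (0 : Int).toNat
        ((PySem.List.slice [a, b, c, d, e] none (some (0 + 1))).foldl (· + ·) 0)) from by
        unfold pvA_inner; rw [hrow, hprev],
      pvInner_step _ _ _ _ hi hil _ hprev, pvInner_step _ _ _ _ hi hil _ hprev,
      pvInner_step _ _ _ _ hi hil _ hprev, pvInner_step _ _ _ _ hi hil _ hprev]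
  simp [PySem.List.slice, List.set]

-- outer loop invariant: after processing rows 2..k, row k holds pvR (k-1)
theorem pvOuter_loop (N : Nat) (arrI : List (List Int)) (hlen : arrI.length = N + 1)
    (hall : ∀ l ∈ arrI, l.length = 5) (h1 : arrI.getD 1 [] = pvQ (pvR 0)) :
    ∀ k : Nat, 1 ≤ k → k ≤ N →
      ((PySem.List.pyRange 2 ((k : Int) + 1) 1).foldl pvA_outer arrI).length = N + 1 ∧
      (∀ l ∈ (PySem.List.pyRange 2 ((k : Int) + 1) 1).foldl pvA_outer arrI, l.length = 5) ∧
      ((PySem.List.pyRange 2 ((k : Int) + 1) 1).foldl pvA_outer arrI).getD k [] = pvQ (pvR (k - 1)) := by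
  intro k hk
  induction k, hk using Nat.le_induction with
  | base =>
    intro _
    rw [show ((1 : Nat) : Int) + 1 = 2 by norm_num, PySem.List.pyRange_one_eq_nil (le_refl 2)]
    exact ⟨hlen, hall, by simpa using h1⟩
  | succ k hk ih =>
    intro hkN
    obtain ⟨ihl, ihall, ihrow⟩ := ih (by omega)
    rw [show (((k + 1 : Nat) : Int) + 1) = ((k : Int) + 1) + 1 by push_cast; ring,
        PySem.List.pyRange_one_succ_right (by exact_mod_cast Nat.succ_le_succ hk),
        List.foldl_append]
    set arrF := (PySem.List.pyRange 2 ((k : Int) + 1) 1).foldl pvA_outer arrI with hF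
    simp only [List.foldl]
    rcases hR : pvR (k - 1) with ⟨a, b, c, d, e⟩
    have hiT : ((k : Int) + 1).toNat = k + 1 := by omega
    have hil : ((k : Int) + 1).toNat < arrF.length := by rw [hiT, ihl]; omega
    have hrow5 : (arrF.getD ((k : Int) + 1).toNat []).length = 5 := by
      exact ihall _ (pvGetD_mem _ _ _ hil)
    have hprev : arrF.getD (((k : Int) + 1) - 1).toNat [] = [a, b, c, d, e] := by
      rw [show (((k : Int) + 1) - 1).toNat = k by omega, ihrow, hR]; rfl
    rw [pvInner_loop arrF ((k : Int) + 1) (by omega) hil hrow5 a b c d e hprev]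
    refine ⟨by simpa using ihl, ?_, ?_⟩
    · intro l hl
      rcases pvMem_set _ _ _ _ hl with h | h
      · exact ihall _ h
      · rw [h]; rfl
    · rw [hiT, pvGetD_set_self _ _ _ (by rw [ihl]; omega)]
      have : pvR (k + 1 - 1) = pvR ((k - 1) + 1) := by congr 1; omega
      rw [this]
      simp [pvR, hR, pvQ]

-- the components of pvR k, as exact multiples
theorem pvR_struct : ∀ k : Nat, ∃ c d e : Int,
    pvR k = (1, (k : Int) + 1, c, d, e) ∧
    2 * c = ((k : Int) + 1) * ((k : Int) + 2) ∧
    6 * d = ((k : Int) + 1) * ((k : Int) + 2) * ((k : Int) + 3) ∧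
    24 * e = ((k : Int) + 1) * ((k : Int) + 2) * ((k : Int) + 3) * ((k : Int) + 4) := by
  intro k
  induction k with
  | zero => exact ⟨1, 1, 1, by simp [pvR], by norm_num, by norm_num, by norm_num⟩
  | succ k ih =>
    obtain ⟨c, d, e, hR, hc, hd, he⟩ := ih
    refine ⟨1 + ((k : Int) + 1) + c, 1 + ((k : Int) + 1) + c + d,
      1 + ((k : Int) + 1) + c + d + e, ?_, ?_, ?_, ?_⟩
    · simp [pvR, hR]; ring
    · push_cast; nlinarith [hc]
    · push_cast; nlinarith [hc, hd]
    · push_cast; nlinarith [hc, hd, he]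

-- 24 times the sum of row k+1 is (k+2)(k+3)(k+4)(k+5)
theorem pvSum24 (k : Nat) :
    24 * ((pvQ (pvR k)).foldl (· + ·) 0) =
      ((k : Int) + 2) * ((k : Int) + 3) * ((k : Int) + 4) * ((k : Int) + 5) := by
  obtain ⟨c, d, e, hR, hc, hd, he⟩ := pvR_struct k
  rw [hR]
  simp only [pvQ, List.foldl]
  nlinarith [hc, hd, he]

-- ===== VERDICT (by name: the statement is the Claim_ definition above) =====
theorem num_string_spec : Claim_equal_num_string := by
  intro n _ hpre
  unfold Pre_num_string at hpre
  unfold Spec_num_string num_string num_string_alt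
  set N := n.toNat with hN
  have hn : n = (N : Int) := by omega
  have hN1 : 1 ≤ N := by omega
  show ((((PySem.List.pyRange 2 (n + 1) 1).foldl pvA_outer
      ((PySem.List.pyRange 0 5 1).foldl pvA_set1
        ((PySem.List.pyRange 0 (n + 1) 1).map (fun _ => [0, 0, 0, 0, 0])))).getD n.toNat []).foldl
      (· + ·) 0) = PySem.Int.floordiv ((n + 1) * (n + 2) * (n + 3) * (n + 4)) 24
  rw [hn]
  simp only [Int.toNat_natCast]
  set arr0 : List (List Int) := (PySem.List.pyRange 0 ((N : Int) + 1) 1).map (fun _ => [0, 0, 0, 0, 0]) with h0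
  have hlen0 : arr0.length = N + 1 := by
    rw [h0, List.length_map, PySem.List.length_pyRange_one]; omega
  have hall0 : ∀ l ∈ arr0, l.length = 5 := by
    intro l hl
    rw [h0, List.mem_map] at hl
    obtain ⟨_, _, rfl⟩ := hl; rfl
  have hget0 : arr0.getD 1 [] = [0, 0, 0, 0, 0] := by
    have hi' : 1 < arr0.length := by omega
    rw [List.getD_eq_getElem _ _ hi']
    simp [h0]
  -- the first loop
  rw [pvSet1_loop arr0 (by omega) (by rw [hget0]; rfl)]
  set arr1 := arr0.set 1 [1, 1, 1, 1, 1] with h1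
  have hlen1 : arr1.length = N + 1 := by rw [h1, List.length_set]; exact hlen0
  have hall1 : ∀ l ∈ arr1, l.length = 5 := by
    intro l hl
    rcases pvMem_set _ _ _ _ hl with h | h
    · exact hall0 _ h
    · rw [h]; rfl
  have hget1 : arr1.getD 1 [] = pvQ (pvR 0) := by
    rw [h1, pvGetD_set_self _ _ _ (by omega)]; rfl
  -- the outer loop
  obtain ⟨_, _, hrowN⟩ := pvOuter_loop N arr1 hlen1 hall1 hget1 N hN1 (le_refl N)
  rw [hrowN]
  -- closed form
  have h24 := pvSum24 (N - 1)
  have hcast : ((N - 1 : Nat) : Int) = (N : Int) - 1 := by omega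
  rw [hcast] at h24
  rw [PySem.Int.floordiv_eq_ediv_of_pos (by norm_num)]
  rw [show ((((N : Int)) + 1) * (((N : Int)) + 2) * (((N : Int)) + 3) * (((N : Int)) + 4)) =
        24 * ((pvQ (pvR (N - 1))).foldl (· + ·) 0) from by rw [h24]; ring]
  rw [Int.mul_ediv_cancel_left _ (by norm_num)]
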